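-- pv_equiv track=rewrite | github.com/Bladedrinks/for_loop | prime_number_06.py | insert_and_in
-- ===== SOURCE A (Python) =====
-- def insert_and_in(list_name):
--     """
--     Insert the conjunction of " and " into a string (usually between the penultimate word and the last word.
--     For example, we got a list:
--
--                                           factors = [1, 3, 7, 21].
--
--     We want to change it into a string without square brackets outside, like this:
--
--                                                 1, 3, 7 and 21
--
--     We can pass in the list name "factors" as the parameter by assigning the variable "factors" to the variable
--     "list_name" and we will get a list shown above."""
--     list_in_str = ""
--     # test case: list_name = [45, 98, 45]
--     # index:                  -3  -2  -1
--     # test case: list_name = [45]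
--     # index:                  -1
--     for i in range(-len(list_name), 0):
--         if i == -1:
--             list_in_str += f"{list_name[i]}"
--         elif i == -2:
--             list_in_str += f"{list_name[i]} and "
--         else:
--             list_in_str += f"{list_name[i]}, "
--     return list_in_str
-- ===== SOURCE B (Python) =====
-- def insert_and_in(list_name):
--     if not list_name:
--         return ""
--     if len(list_name) == 1:
--         return str(list_name[0])
--     return ", ".join(str(x) for x in list_name[:-1]) + " and " + str(list_name[-1])
-- ===== Notes on version B (the rewrite author's own statement) =====
-- stated objective: simpler
-- what changed: Replaces the per-index loop over negative indices with three cases: empty, singleton, and a bulk ', '.join over all-but-last plus an explicit ' and ' + last element.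
import Mathlib
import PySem

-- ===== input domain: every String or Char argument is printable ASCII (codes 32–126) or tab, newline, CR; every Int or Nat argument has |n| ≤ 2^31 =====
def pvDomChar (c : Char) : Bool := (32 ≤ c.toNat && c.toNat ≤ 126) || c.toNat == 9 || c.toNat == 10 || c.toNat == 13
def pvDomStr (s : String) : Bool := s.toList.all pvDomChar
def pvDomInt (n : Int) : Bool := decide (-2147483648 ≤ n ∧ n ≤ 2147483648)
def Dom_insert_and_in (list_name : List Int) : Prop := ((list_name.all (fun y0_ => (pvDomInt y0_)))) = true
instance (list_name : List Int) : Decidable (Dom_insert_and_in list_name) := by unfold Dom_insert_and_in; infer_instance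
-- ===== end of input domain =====

-- B replaces A's per-negative-index loop by an empty/singleton guard plus one ", ".join
-- over all-but-last and an explicit " and " + last element (objective: simpler).


-- ===== PORT A =====
-- indexing list_name[i] is always in range (i ∈ [-len, 0)), so pyGetD is exact here
def insert_and_in (list_name : List Int) : String :=
  (PySem.List.pyRange (-(list_name.length : Int)) 0 1).foldl
    (fun list_in_str i =>
      if i = -1 then list_in_str ++ PySem.Int.toStr (PySem.List.pyGetD list_name i 0)
      else if i = -2 then list_in_str ++ PySem.Int.toStr (PySem.List.pyGetD list_name i 0) ++ " and "
      else list_in_str ++ PySem.Int.toStr (PySem.List.pyGetD list_name i 0) ++ ", ") ""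

-- ===== PORT B =====
def insert_and_in_alt (list_name : List Int) : String :=
  if list_name = [] then ""
  else if list_name.length = 1 then PySem.Int.toStr (PySem.List.pyGetD list_name 0 0)
  else
    PySem.Str.join ", " ((PySem.List.slice list_name none (some (-1))).map PySem.Int.toStr)
      ++ " and " ++ PySem.Int.toStr (PySem.List.pyGetD list_name (-1) 0)

-- ===== PRECONDITION & SPEC =====
def Spec_insert_and_in (list_name : List Int) (out : String) : Prop := out = insert_and_in_alt list_name
instance (list_name : List Int) (out : String) : Decidable (Spec_insert_and_in list_name out) := by unfold Spec_insert_and_in; infer_instance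

-- ===== CLAIM (what is proved, stated in full; the proofs are below) =====
def Claim_equal_insert_and_in : Prop := ∀ (list_name : List Int), Dom_insert_and_in list_name → Spec_insert_and_in list_name (insert_and_in list_name)

-- ===== LEMMAS AND PROOFS =====

-- A's loop body, named for the proofs
def stepA (l : List Int) (acc : String) (i : Int) : String :=
  if i = -1 then acc ++ PySem.Int.toStr (PySem.List.pyGetD l i 0)
  else if i = -2 then acc ++ PySem.Int.toStr (PySem.List.pyGetD l i 0) ++ " and "
  else acc ++ PySem.Int.toStr (PySem.List.pyGetD l i 0) ++ ", "

-- the common value of both programs, by structural recursion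
def tailStr : List Int → String
  | [] => ""
  | [x] => PySem.Int.toStr x
  | [x, y] => PySem.Int.toStr x ++ " and " ++ PySem.Int.toStr y
  | x :: xs => PySem.Int.toStr x ++ ", " ++ tailStr xs

-- negative indexing ignores a prepended head
theorem pyGetD_cons_neg (x : Int) (xs : List Int) (i : Int) (d : Int)
    (h1 : -(xs.length : Int) ≤ i) (h2 : i < 0) :
    PySem.List.pyGetD (x :: xs) i d = PySem.List.pyGetD xs i d := by
  obtain ⟨k, hk⟩ : ∃ k : Nat, i = -(k : Int) := ⟨(-i).toNat, by omega⟩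
  subst hk
  have hk1 : 0 < k := by omega
  have hk2 : k ≤ xs.length := by omega
  rw [PySem.List.pyGetD_neg_natCast _ _ _ hk1 (by simp; omega),
      PySem.List.pyGetD_neg_natCast _ _ _ hk1 hk2]
  apply Option.some.inj
  rw [← List.getElem?_eq_getElem, ← List.getElem?_eq_getElem,
      show (x :: xs).length - k = (xs.length - k) + 1 from by simp; omega]
  simp

theorem foldl_congr_gen {α β : Type} (l : List β) (f g : α → β → α) (init : α)
    (h : ∀ acc b, b ∈ l → f acc b = g acc b) : l.foldl f init = l.foldl g init := by
  induction l generalizing init with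
  | nil => rfl
  | cons b bs ih =>
      simp only [List.foldl_cons]
      rw [h init b (by simp)]
      exact ih _ (fun acc c hc => h acc c (by simp [hc]))

-- the first loop iteration, on index -(len)
theorem stepA_head (x : Int) (xs : List Int) (acc : String) :
    stepA (x :: xs) acc (-((x :: xs).length : Int)) =
      if xs = [] then acc ++ PySem.Int.toStr x
      else if xs.length = 1 then acc ++ PySem.Int.toStr x ++ " and "
      else acc ++ PySem.Int.toStr x ++ ", " := by
  have hget : PySem.List.pyGetD (x :: xs) (-((x :: xs).length : Int)) 0 = x := by
    rw [PySem.List.pyGetD_neg_natCast _ _ _ (by simp) (le_refl _)]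
    simp
  unfold stepA
  rw [hget]
  rcases xs with _ | ⟨y, ys⟩
  · simp
  · rcases ys with _ | ⟨z, zs⟩
    · have c1 : ¬(-(((x :: [y]).length : Nat) : Int) = -1) := by simp
      have c2 : -(((x :: [y]).length : Nat) : Int) = -2 := by simp
      rw [if_neg c1, if_pos c2]
      simp
    · have c1 : ¬(-(((x :: y :: z :: zs).length : Nat) : Int) = -1) := by
        simp; omega
      have c2 : ¬(-(((x :: y :: z :: zs).length : Nat) : Int) = -2) := by
        simp; omega
      rw [if_neg c1, if_neg c2]
      simp

-- A's loop computes tailStr, appended to the accumulator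
theorem loopA_eq (l : List Int) (acc : String) :
    (PySem.List.pyRange (-(l.length : Int)) 0 1).foldl (stepA l) acc = acc ++ tailStr l := by
  induction l generalizing acc with
  | nil => simp [PySem.List.pyRange_one_eq_nil, tailStr]
  | cons x xs ih =>
      rw [PySem.List.pyRange_one_cons (by simp; omega), List.foldl_cons]
      have hshift : -(((x :: xs).length : Nat) : Int) + 1 = -(xs.length : Int) := by
        simp only [List.length_cons]; push_cast; ring
      rw [hshift]
      rw [foldl_congr_gen _ (stepA (x :: xs)) (stepA xs) _ (by
        intro acc' i hi
        rw [PySem.List.mem_pyRange_one] at hi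
        unfold stepA
        rw [pyGetD_cons_neg x xs i 0 hi.1 hi.2])]
      rw [ih, stepA_head]
      rcases xs with _ | ⟨y, ys⟩
      · simp [tailStr]
      · rcases ys with _ | ⟨z, zs⟩
        · simp [tailStr, String.append_assoc]
        · simp [tailStr, String.append_assoc]

theorem strjoin_singleton (sep a : String) : PySem.Str.join sep [a] = a := by
  apply String.toList_inj.mp
  simp [PySem.Str.toList_join, PySem.Chars.join_singleton]

theorem strjoin_cons_cons (sep a b : String) (r : List String) :
    PySem.Str.join sep (a :: b :: r) = a ++ sep ++ PySem.Str.join sep (b :: r) := by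
  apply String.toList_inj.mp
  simp [PySem.Str.toList_join, PySem.Chars.join_cons_cons]

-- B's join-plus-last expression computes tailStr on lists of length ≥ 2
theorem join_and_eq (x y : Int) (r : List Int) :
    PySem.Str.join ", " (((x :: y :: r).dropLast).map PySem.Int.toStr) ++ " and "
      ++ PySem.Int.toStr ((x :: y :: r).getLast (by simp)) = tailStr (x :: y :: r) := by
  induction r generalizing x y with
  | nil => simp [tailStr, strjoin_singleton]
  | cons z zs ih =>
      have hd : (x :: y :: z :: zs).dropLast = x :: (y :: z :: zs).dropLast := by
        simp [List.dropLast]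
      have hd2 : ∃ w ws, (y :: z :: zs).dropLast = w :: ws := by
        rcases zs with _ | ⟨u, us⟩ <;> exact ⟨_, _, rfl⟩
      obtain ⟨w, ws, hws⟩ := hd2
      rw [hd, List.map_cons, hws, List.map_cons, strjoin_cons_cons, ← List.map_cons, ← hws]
      rw [List.getLast_cons (by simp)]
      have := ih y z
      rw [show tailStr (x :: y :: z :: zs) = PySem.Int.toStr x ++ ", " ++ tailStr (y :: z :: zs) from rfl]
      rw [← this]
      simp [String.append_assoc]

theorem alt_eq_tailStr (l : List Int) : insert_and_in_alt l = tailStr l := by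
  rcases l with _ | ⟨x, xs⟩
  · simp [insert_and_in_alt, tailStr]
  · rcases xs with _ | ⟨y, ys⟩
    · simp [insert_and_in_alt, tailStr, PySem.List.pyGetD_zero_cons]
    · unfold insert_and_in_alt
      rw [if_neg (by simp), if_neg (by simp)]
      rw [PySem.List.slice_to_neg_one, PySem.List.pyGetD_neg_one _ _ (by simp)]
      exact join_and_eq x y ys

-- ===== VERDICT (by name: the statement is the Claim_ definition above) =====
theorem insert_and_in_spec : Claim_equal_insert_and_in := by
  intro l _
  unfold Spec_insert_and_in
  have hA : insert_and_in l = tailStr l := by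
    have := loopA_eq l ""
    simpa [insert_and_in, stepA] using this
  rw [hA, alt_eq_tailStr]
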